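-- pv_equiv track=rewrite | github.com/cwlin4916/nsai-for-infrastructure | tests/test_az_cartpole.py | parse_cartpole_output
-- ===== SOURCE A (Python) =====
-- def parse_cartpole_output(raw_output):
--     lines = raw_output.splitlines()
--     preamble_lines = []
--     iteration_blocks = []
--     current_block = None
--
--     for line in lines:
--         if line.startswith("Training iteration"):
--             current_block = [line]
--             iteration_blocks.append(current_block)
--             continue
--         if current_block is None:
--             preamble_lines.append(line)
--             continue
--         current_block.append(line)
--
--     assert iteration_blocks, "Output missing training iterations."
--     preamble = "\n".join(preamble_lines)
--     iterations = ["\n".join(block) for block in iteration_blocks]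
--     return preamble, iterations
-- ===== SOURCE B (Python) =====
-- def parse_cartpole_output(raw_output):
--     lines = raw_output.splitlines()
--     rev_iterations = []
--     tail = []
--     for line in reversed(lines):
--         tail.append(line)
--         if line.startswith("Training iteration"):
--             tail.reverse()
--             rev_iterations.append("\n".join(tail))
--             tail = []
--     assert rev_iterations, "Output missing training iterations."
--     tail.reverse()
--     return "\n".join(tail), rev_iterations[::-1]
-- ===== Notes on version B (the rewrite author's own statement) =====
-- stated objective: alternative
-- what changed: B scans the lines back-to-front, accumulating the current block and flushing a joined block at every boundary line, instead of A's forward scan that mutates an aliased current_block list; it trades A's aliasing trick for a single reversed pass.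
import Mathlib
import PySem

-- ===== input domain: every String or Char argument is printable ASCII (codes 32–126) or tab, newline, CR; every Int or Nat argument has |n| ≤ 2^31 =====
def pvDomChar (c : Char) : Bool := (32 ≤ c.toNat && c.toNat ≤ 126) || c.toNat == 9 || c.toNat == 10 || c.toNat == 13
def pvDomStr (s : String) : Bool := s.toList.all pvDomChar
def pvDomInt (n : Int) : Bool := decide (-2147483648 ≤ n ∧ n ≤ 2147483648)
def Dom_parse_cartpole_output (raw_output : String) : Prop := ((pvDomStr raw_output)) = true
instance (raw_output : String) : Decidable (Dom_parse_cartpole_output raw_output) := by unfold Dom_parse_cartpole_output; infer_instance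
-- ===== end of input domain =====

-- B replaces A's forward scan (with an aliased mutable current_block) by a single
-- back-to-front scan that flushes a joined block at each boundary line (objective: alternative).

def pvIsBoundary (line : String) : Bool := PySem.Str.startswith line "Training iteration"

-- ===== PORT A =====
-- Python's current_block aliases the last element of iteration_blocks; the port keeps the
-- current block as separate state `cur` and flushes it into `done` when a new block starts
-- (and at the end), which yields exactly the same final list values.
def pvLoopA : List String → List String → List (List String) → Option (List String) → List String × List (List String)
  | [], pre, done, cur => (pre, done ++ (match cur with | none => [] | some b => [b]))
  | l :: ls, pre, done, cur =>
    if pvIsBoundary l then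
      pvLoopA ls pre (done ++ (match cur with | none => [] | some b => [b])) (some [l])
    else
      match cur with
      | none => pvLoopA ls (pre ++ [l]) done none
      | some b => pvLoopA ls pre done (some (b ++ [l]))

def parse_cartpole_output (raw_output : String) : String × List String :=
  let lines := PySem.Str.splitlines raw_output
  let r := pvLoopA lines [] [] none
  (PySem.Str.join "\n" r.1, r.2.map (PySem.Str.join "\n"))

-- ===== PORT B =====
def pvStepB (st : List String × List String) (line : String) : List String × List String :=
  let tl := st.2 ++ [line]
  if pvIsBoundary line then (st.1 ++ [PySem.Str.join "\n" tl.reverse], [])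
  else (st.1, tl)

def parse_cartpole_output_alt (raw_output : String) : String × List String :=
  let lines := PySem.Str.splitlines raw_output
  let st := lines.reverse.foldl pvStepB ([], [])
  (PySem.Str.join "\n" st.2.reverse, st.1.reverse)

-- ===== PRECONDITION & SPEC =====
-- Pre_ excludes exactly the inputs with no "Training iteration" line, where Python A
-- (and Python B alike) raises AssertionError.
def Pre_parse_cartpole_output (raw_output : String) : Prop :=
  ((PySem.Str.splitlines raw_output).any pvIsBoundary) = true
instance (raw_output : String) : Decidable (Pre_parse_cartpole_output raw_output) := by
  unfold Pre_parse_cartpole_output; infer_instance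

def pvWitness_parse_cartpole_output : String := "setup\nTraining iteration 1\nreward 9"

def Spec_parse_cartpole_output (raw_output : String) (out : String × List String) : Prop := out = parse_cartpole_output_alt raw_output
instance (raw_output : String) (out : String × List String) : Decidable (Spec_parse_cartpole_output raw_output out) := by unfold Spec_parse_cartpole_output; infer_instance

-- ===== CLAIM (what is proved, stated in full; the proofs are below) =====
def Claim_equal_parse_cartpole_output : Prop := ∀ (raw_output : String), Dom_parse_cartpole_output raw_output → Pre_parse_cartpole_output raw_output → Spec_parse_cartpole_output raw_output (parse_cartpole_output raw_output)

-- ===== LEMMAS AND PROOFS =====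

-- Common characterisation: preamble lines and blocks (as line lists), defined by foldr-style recursion.
def pvSpecSplit : List String → List String × List (List String)
  | [] => ([], [])
  | l :: ls =>
    let r := pvSpecSplit ls
    if pvIsBoundary l then ([], (l :: r.1) :: r.2) else (l :: r.1, r.2)

theorem pvLoopA_eq (ls : List String) : ∀ (pre : List String) (done : List (List String)) (cur : Option (List String)),
    pvLoopA ls pre done cur =
      match cur with
      | none => (pre ++ (pvSpecSplit ls).1, done ++ (pvSpecSplit ls).2)
      | some b => (pre, done ++ (b ++ (pvSpecSplit ls).1) :: (pvSpecSplit ls).2) := by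
  induction ls with
  | nil => intro pre done cur; cases cur <;> simp [pvLoopA, pvSpecSplit]
  | cons l ls ih =>
    intro pre done cur
    cases cur with
    | none =>
      by_cases h : pvIsBoundary l = true <;>
        simp [pvLoopA, pvSpecSplit, h, ih]
    | some b =>
      by_cases h : pvIsBoundary l = true <;>
        simp [pvLoopA, pvSpecSplit, h, ih]

theorem pvSpecSplit_no_boundary (rest : List String) (h : ∀ l ∈ rest, pvIsBoundary l = false) :
    pvSpecSplit rest = (rest, []) := by
  induction rest with
  | nil => rfl
  | cons l ls ih =>
    have hl := h l (by simp)
    simp [pvSpecSplit, hl, ih (fun x hx => h x (by simp [hx]))]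

theorem pvFoldB_eq (ls : List String) : ∀ (rest : List String) (its : List String),
    (∀ l ∈ rest, pvIsBoundary l = false) →
    List.foldl pvStepB (its, rest.reverse) ls.reverse =
      (its ++ ((pvSpecSplit (ls ++ rest)).2.map (PySem.Str.join "\n")).reverse,
       (pvSpecSplit (ls ++ rest)).1.reverse) := by
  induction ls with
  | nil =>
    intro rest its h
    simp [pvSpecSplit_no_boundary rest h]
  | cons x ls ih =>
    intro rest its h
    have : (x :: ls).reverse = ls.reverse ++ [x] := by simp
    rw [this, List.foldl_append, ih rest its h]
    by_cases hx : pvIsBoundary x = true <;>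
      simp [pvStepB, pvSpecSplit, hx, List.append_assoc]

theorem parse_cartpole_output_spec : Claim_equal_parse_cartpole_output := by
  unfold Claim_equal_parse_cartpole_output
  intro raw _ _
  unfold Spec_parse_cartpole_output parse_cartpole_output parse_cartpole_output_alt
  have hA := pvLoopA_eq (PySem.Str.splitlines raw) [] [] none
  have hB := pvFoldB_eq (PySem.Str.splitlines raw) [] [] (by simp)
  simp at hA hB
  simp [hA, hB]
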